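-- pv_equiv track=rewrite | github.com/immeritos/leetcode-acm | test/heap-longest-time.py | min_max_load
-- ===== SOURCE A (Python) =====
-- import heapq
--
-- def min_max_load(n, m, sample_lens):
--     if m == 0 or n == 0:
--         return 0
--
--     # LPT：样本按长度降序
--     a = sorted(sample_lens, reverse=True)
--
--     # 最小堆：每台 NPU 的当前负载
--     load = [0] * n
--     heapq.heapify(load)
--
--     l_max = 0
--     for x in a:
--         cur = heapq.heappop(load)   # 当前最空闲
--         cur += x                    # 分配样本
--         l_max = max(l_max, cur)     # 更新最大负载
--         heapq.heappush(load, cur)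
--
--     return l_max
-- ===== SOURCE B (Python) =====
-- def min_max_load(n, m, sample_lens):
--     if m == 0 or n == 0:
--         return 0
--     loads = [0] * n
--     l_max = 0
--     for x in sorted(sample_lens, reverse=True):
--         i = min(range(n), key=lambda j: loads[j])
--         loads[i] += x
--         if loads[i] > l_max:
--             l_max = loads[i]
--     return l_max
-- ===== Notes on version B (the rewrite author's own statement) =====
-- stated objective: simpler
-- what changed: Replaces the binary min-heap (heapify/heappop/heappush) by a plain list of machine loads with an explicit linear scan for the least-loaded machine; no priority-queue maintenance, just index the minimum and add in place.
import Mathlib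
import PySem

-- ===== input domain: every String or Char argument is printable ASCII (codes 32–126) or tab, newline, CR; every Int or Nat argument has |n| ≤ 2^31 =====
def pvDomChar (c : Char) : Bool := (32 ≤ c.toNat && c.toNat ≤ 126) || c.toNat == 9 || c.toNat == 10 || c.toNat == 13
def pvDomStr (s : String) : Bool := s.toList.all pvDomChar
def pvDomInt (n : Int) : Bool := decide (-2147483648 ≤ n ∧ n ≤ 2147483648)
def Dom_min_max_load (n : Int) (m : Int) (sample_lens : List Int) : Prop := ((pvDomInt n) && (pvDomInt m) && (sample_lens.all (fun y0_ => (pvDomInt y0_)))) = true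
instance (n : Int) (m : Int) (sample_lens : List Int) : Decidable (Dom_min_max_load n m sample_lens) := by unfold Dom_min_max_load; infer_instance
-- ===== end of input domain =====

-- B replaces A's binary min-heap (heapify/heappop/heappush) by a plain list of loads with an
-- explicit linear min-scan per sample: simpler, no priority-queue maintenance ("simpler", not faster).

-- ===== PORT A =====
-- total in-range read heap[i] of the Python list (0 default is never hit inside Pre_)
def aread (h : Array Int) (i : Nat) : Int := h.getD i 0

-- Hand port of CPython heapq._siftdown, exact step for step; the Python list is represented
-- as Array Int (list indexing/assignment are always in range when heapq calls these;
-- getD 0 / setIfInBounds are the total forms of those in-range accesses).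
def hpSiftdown (h : Array Int) (startpos pos : Nat) (newitem : Int) : Array Int :=
  if _hsp : startpos < pos then
    let parentpos := (pos - 1) / 2
    let parent := aread h parentpos
    if newitem < parent then
      hpSiftdown (h.setIfInBounds pos parent) startpos parentpos newitem
    else h.setIfInBounds pos newitem
  else h.setIfInBounds pos newitem
termination_by pos
decreasing_by omega

-- Hand port of the loop of CPython heapq._siftup (exact), followed by the final
-- heap[pos] = newitem; _siftdown(heap, startpos, pos).
def hpSiftupLoop (h : Array Int) (startpos pos childpos : Nat) (newitem : Int) : Array Int :=
  if _hc : childpos < h.size then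
    let childpos2 := if childpos + 1 < h.size ∧ ¬ (aread h childpos < aread h (childpos + 1))
      then childpos + 1 else childpos
    hpSiftupLoop (h.setIfInBounds pos (aread h childpos2)) startpos childpos2 (2 * childpos2 + 1) newitem
  else hpSiftdown (h.setIfInBounds pos newitem) startpos pos newitem
termination_by h.size - childpos
decreasing_by simp only [Array.size_setIfInBounds]; split <;> omega

def hpSiftup (h : Array Int) (pos : Nat) : Array Int :=
  hpSiftupLoop h pos pos (2 * pos + 1) (aread h pos)

-- heapq.heappush: append, then _siftdown(heap, 0, len(heap)-1) with newitem = the pushed item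
def hpPush (h : Array Int) (item : Int) : Array Int :=
  hpSiftdown (h.push item) 0 h.size item

-- heapq.heappop: lastelt = heap.pop(); … (pop on [] raises IndexError in Python: such calls
-- are excluded by Pre_; the getD 0 dummy is never relied on inside Pre_)
def hpPop (h : Array Int) : Int × Array Int :=
  let lastelt := h.back?.getD 0
  let rest := h.pop
  if rest.isEmpty then (lastelt, rest)
  else (aread rest 0, hpSiftup (rest.setIfInBounds 0 lastelt) 0)

-- heapq.heapify: for i in reversed(range(n//2)): _siftup(heap, i)
def hpHeapify (h : Array Int) : Array Int :=
  ((List.range (h.size / 2)).reverse).foldl (fun acc i => hpSiftup acc i) h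

def stepA (st : Array Int × Int) (x : Int) : Array Int × Int :=
  let pr := hpPop st.1
  let cur := pr.1 + x
  (hpPush pr.2 cur, max st.2 cur)

def min_max_load (n : Int) (m : Int) (sample_lens : List Int) : Int :=
  if m = 0 ∨ n = 0 then 0
  else
    ((PySem.List.sorted sample_lens (fun x => x) true).foldl stepA
      (hpHeapify (Array.replicate n.toNat 0), 0)).2

-- ===== PORT B =====
-- min(range(n), key=lambda j: loads[j]): linear scan keeping the first strictly smaller load
def bMinIdxAux (loads : Array Int) (j bi : Nat) (bv : Int) : Nat :=
  if _hj : j < loads.size then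
    if aread loads j < bv then bMinIdxAux loads (j + 1) j (aread loads j)
    else bMinIdxAux loads (j + 1) bi bv
  else bi
termination_by loads.size - j

def bMinIdx (loads : Array Int) : Nat := bMinIdxAux loads 1 0 (aread loads 0)

def stepB (st : Array Int × Int) (x : Int) : Array Int × Int :=
  let i := bMinIdx st.1
  let v := aread st.1 i + x
  (st.1.setIfInBounds i v, if st.2 < v then v else st.2)

def min_max_load_alt (n : Int) (m : Int) (sample_lens : List Int) : Int :=
  if m = 0 ∨ n = 0 then 0
  else
    ((PySem.List.sorted sample_lens (fun x => x) true).foldl stepB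
      (Array.replicate n.toNat 0, 0)).2

-- ===== PRECONDITION & SPEC =====
-- Pre_ excludes only inputs where A raises: n < 0 with a nonempty sample list makes
-- heapq.heappop raise IndexError on the empty heap ([0]*n == [] for n < 0); B raises there too.
def Pre_min_max_load (n : Int) (m : Int) (sample_lens : List Int) : Prop :=
  0 ≤ n ∨ sample_lens = []
instance (n : Int) (m : Int) (sample_lens : List Int) : Decidable (Pre_min_max_load n m sample_lens) := by unfold Pre_min_max_load; infer_instance

def pvWitness_min_max_load : Int × Int × List Int := (2, 1, [3, 1, 2])

def Spec_min_max_load (n : Int) (m : Int) (sample_lens : List Int) (out : Int) : Prop := out = min_max_load_alt n m sample_lens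
instance (n : Int) (m : Int) (sample_lens : List Int) (out : Int) : Decidable (Spec_min_max_load n m sample_lens out) := by unfold Spec_min_max_load; infer_instance

-- ===== CLAIM (what is proved, stated in full; the proofs are below) =====
def Claim_equal_min_max_load : Prop := ∀ (n : Int) (m : Int) (sample_lens : List Int), Dom_min_max_load n m sample_lens → Pre_min_max_load n m sample_lens → Spec_min_max_load n m sample_lens (min_max_load n m sample_lens)

-- ===== LEMMAS AND PROOFS =====

-- List-level models of the two ports (proof-only; the ports themselves run on Array,
-- the simulation lemmas below identify them with these via Array.toList)
def lSiftdown (h : List Int) (startpos pos : Nat) (newitem : Int) : List Int :=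
  if _hsp : startpos < pos then
    let parentpos := (pos - 1) / 2
    let parent := h.getD parentpos 0
    if newitem < parent then
      lSiftdown (h.set pos parent) startpos parentpos newitem
    else h.set pos newitem
  else h.set pos newitem
termination_by pos
decreasing_by omega

def lSiftupLoop (h : List Int) (startpos pos childpos : Nat) (newitem : Int) : List Int :=
  if _hc : childpos < h.length then
    let childpos2 := if childpos + 1 < h.length ∧ ¬ (h.getD childpos 0 < h.getD (childpos + 1) 0)
      then childpos + 1 else childpos
    lSiftupLoop (h.set pos (h.getD childpos2 0)) startpos childpos2 (2 * childpos2 + 1) newitem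
  else lSiftdown (h.set pos newitem) startpos pos newitem
termination_by h.length - childpos
decreasing_by simp only [List.length_set]; split <;> omega

def lSiftup (h : List Int) (pos : Nat) : List Int :=
  lSiftupLoop h pos pos (2 * pos + 1) (h.getD pos 0)

def lPush (h : List Int) (item : Int) : List Int :=
  lSiftdown (h ++ [item]) 0 h.length item

def lPop (h : List Int) : Int × List Int :=
  let lastelt := h.getLast?.getD 0
  let rest := h.dropLast
  if rest.isEmpty then (lastelt, rest)
  else (rest.getD 0 0, lSiftup (rest.set 0 lastelt) 0)

def lHeapify (h : List Int) : List Int :=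
  ((List.range (h.length / 2)).reverse).foldl (fun acc i => lSiftup acc i) h

def lStepA (st : List Int × Int) (x : Int) : List Int × Int :=
  let pr := lPop st.1
  let cur := pr.1 + x
  (lPush pr.2 cur, max st.2 cur)

def lMinIdxAux (loads : List Int) (j bi : Nat) (bv : Int) : Nat :=
  if _hj : j < loads.length then
    if loads.getD j 0 < bv then lMinIdxAux loads (j + 1) j (loads.getD j 0)
    else lMinIdxAux loads (j + 1) bi bv
  else bi
termination_by loads.length - j

def lMinIdx (loads : List Int) : Nat := lMinIdxAux loads 1 0 (loads.getD 0 0)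

def lStepB (st : List Int × Int) (x : Int) : List Int × Int :=
  let i := lMinIdx st.1
  let v := st.1.getD i 0 + x
  (st.1.set i v, if st.2 < v then v else st.2)


-- binary-heap shape predicates (proof-only)
def IsHeap (h : List Int) : Prop :=
  ∀ i : Nat, 0 < i → i < h.length → h.getD ((i - 1) / 2) 0 ≤ h.getD i 0
-- heap with a "hole" at p: parent/child pairs not touching p are ordered
def HoleHeap (h : List Int) (p : Nat) : Prop :=
  ∀ i : Nat, 0 < i → i < h.length → i ≠ p → (i - 1) / 2 ≠ p → h.getD ((i - 1) / 2) 0 ≤ h.getD i 0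
-- grandparent of the hole ≤ children of the hole
def Bridge (h : List Int) (p : Nat) : Prop :=
  ∀ c : Nat, c < h.length → 0 < c → (c - 1) / 2 = p → 0 < p → h.getD ((p - 1) / 2) 0 ≤ h.getD c 0
-- the value to be placed at the hole is ≤ the hole's children
def ChildOK (h : List Int) (p : Nat) (v : Int) : Prop :=
  ∀ c : Nat, c < h.length → 0 < c → (c - 1) / 2 = p → v ≤ h.getD c 0


-- ---- small getD / multiset facts about list updates ----
lemma getD_set_self (h : List Int) {i : Nat} (hi : i < h.length) (v : Int) :
    (h.set i v).getD i 0 = v := by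
  simp [List.getD_eq_getElem?_getD, hi]

lemma getD_set_ne (h : List Int) {i j : Nat} (hij : i ≠ j) (v : Int) :
    (h.set i v).getD j 0 = h.getD j 0 := by
  simp [List.getD_eq_getElem?_getD, List.getElem?_set_ne, hij]

lemma getD_replicate0 (k i : Nat) : (List.replicate k (0:Int)).getD i 0 = 0 := by
  simp [List.getD_eq_getElem?_getD, List.getElem?_replicate]; split <;> simp

lemma getD_mem0 (h : List Int) {i : Nat} (hi : i < h.length) : h.getD i 0 ∈ h := by
  rw [List.getD_eq_getElem h 0 hi]; exact List.getElem_mem _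

lemma mem_exists_getD (h : List Int) {x : Int} (hx : x ∈ h) :
    ∃ i, i < h.length ∧ h.getD i 0 = x := by
  rcases List.mem_iff_getElem.1 hx with ⟨i, hi, rfl⟩
  exact ⟨i, hi, List.getD_eq_getElem h 0 hi⟩

lemma coe_set_eq (h : List Int) : ∀ (i : Nat), i < h.length → ∀ v : Int,
    ((h.set i v : List Int) : Multiset Int) = v ::ₘ (↑h : Multiset Int).erase (h.getD i 0) := by
  induction h with
  | nil => intro i hi; simp at hi
  | cons a t ih =>
    intro i hi v
    cases i with
    | zero => simp
    | succ i =>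
      simp only [List.set_cons_succ, List.getD_cons_succ]
      have hi' : i < t.length := by simpa using hi
      by_cases hat : a = t.getD i 0
      · have hmem : t.getD i 0 ∈ t := getD_mem0 t hi'
        rw [← Multiset.cons_coe, ← Multiset.cons_coe, ih i hi' v, ← hat,
          Multiset.erase_cons_head, Multiset.cons_swap]
        congr 1
        rw [hat, Multiset.cons_erase (by exact_mod_cast hmem)]
      · rw [← Multiset.cons_coe, ← Multiset.cons_coe, ih i hi' v,
          Multiset.erase_cons_tail _ hat]
        exact Multiset.cons_swap _ _ _

-- the root of a heap is a minimum
lemma root_le {h : List Int} (H : IsHeap h) : ∀ i, i < h.length → h.getD 0 0 ≤ h.getD i 0 := by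
  intro i
  induction i using Nat.strong_induction_on with
  | _ i IH =>
    intro hi
    rcases Nat.eq_zero_or_pos i with rfl | hpos
    · exact le_refl _
    · exact le_trans (IH ((i - 1) / 2) (by omega) (by omega)) (H i hpos hi)

-- ---- unfolding equations for the ported heap loops ----
lemma sd_up (h : List Int) (s p : Nat) (v : Int) (hsp : s < p) (hlt : v < h.getD ((p-1)/2) 0) :
    lSiftdown h s p v = lSiftdown (h.set p (h.getD ((p-1)/2) 0)) s ((p-1)/2) v := by
  rw [lSiftdown]; dsimp only; rw [dif_pos hsp, if_pos hlt]

lemma sd_place (h : List Int) (s p : Nat) (v : Int) (hsp : s < p) (hlt : ¬ v < h.getD ((p-1)/2) 0) :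
    lSiftdown h s p v = h.set p v := by
  rw [lSiftdown]; dsimp only; rw [dif_pos hsp, if_neg hlt]

lemma sd_base (h : List Int) (s p : Nat) (v : Int) (hsp : ¬ s < p) :
    lSiftdown h s p v = h.set p v := by
  rw [lSiftdown]; dsimp only; rw [dif_neg hsp]

lemma su_rec (h : List Int) (s p cp : Nat) (v : Int) (hc : cp < h.length) :
    lSiftupLoop h s p cp v =
      (if cp + 1 < h.length ∧ ¬ (h.getD cp 0 < h.getD (cp + 1) 0)
        then lSiftupLoop (h.set p (h.getD (cp+1) 0)) s (cp+1) (2 * (cp+1) + 1) v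
        else lSiftupLoop (h.set p (h.getD cp 0)) s cp (2 * cp + 1) v) := by
  rw [lSiftupLoop]; dsimp only; rw [dif_pos hc]; split <;> rfl

lemma su_base (h : List Int) (s p cp : Nat) (v : Int) (hc : ¬ cp < h.length) :
    lSiftupLoop h s p cp v = lSiftdown (h.set p v) s p v := by
  rw [lSiftupLoop]; dsimp only; rw [dif_neg hc]

-- ---- siftdown: multiset content and heap-property restoration ----
lemma siftdown_coe : ∀ (p : Nat) (h : List Int) (s : Nat) (v : Int), p < h.length →
    ((lSiftdown h s p v : List Int) : Multiset Int) = ((h.set p v : List Int) : Multiset Int) := by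
  intro p
  induction p using Nat.strong_induction_on with
  | _ p IH =>
    intro h s v hp
    by_cases hsp : s < p
    · by_cases hlt : v < h.getD ((p-1)/2) 0
      · have hpp : (p - 1) / 2 < h.length := by omega
        have hne : p ≠ (p - 1) / 2 := by omega
        rw [sd_up h s p v hsp hlt,
          IH _ (by omega) _ _ _ (by simpa using hpp),
          coe_set_eq _ _ (by simpa using hpp), coe_set_eq _ _ hp,
          getD_set_ne _ hne, coe_set_eq _ _ hp, Multiset.erase_cons_head]
      · rw [sd_place h s p v hsp hlt]
    · rw [sd_base h s p v hsp]

lemma siftdown_heap : ∀ (p : Nat) (h : List Int) (v : Int), p < h.length →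
    HoleHeap h p → Bridge h p → ChildOK h p v → IsHeap (lSiftdown h 0 p v) := by
  intro p
  induction p using Nat.strong_induction_on with
  | _ p IH =>
    intro h v hp HH BR CO
    by_cases hsp : 0 < p
    · set pp := (p - 1) / 2 with hppdef
      have hpph : pp < h.length := by omega
      by_cases hlt : v < h.getD pp 0
      · -- bubble up: hole moves to parentpos
        rw [sd_up h 0 p v hsp hlt]
        refine IH pp (by omega) _ v (by simpa using hpph) ?_ ?_ ?_
        · -- HoleHeap (h.set p (h.getD pp 0)) pp
          intro i hi0 hil hip hpar
          have hil' : i < h.length := by simpa using hil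
          by_cases hipq : i = p
          · exact absurd (hipq ▸ rfl) hpar
          · have e2 : (h.set p (h.getD pp 0)).getD i 0 = h.getD i 0 :=
              getD_set_ne _ (fun hh => hipq hh.symm) _
            by_cases hparp : (i - 1) / 2 = p
            · have e1 : (h.set p (h.getD pp 0)).getD ((i-1)/2) 0 = h.getD pp 0 := by
                rw [hparp]; exact getD_set_self _ hp _
              rw [e1, e2]
              exact BR i hil' hi0 hparp (by omega)
            · have e1 : (h.set p (h.getD pp 0)).getD ((i-1)/2) 0 = h.getD ((i-1)/2) 0 :=
                getD_set_ne _ (fun hh => hparp hh.symm) _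
              rw [e1, e2]
              exact HH i hi0 hil' hipq hparp
        · -- Bridge (h.set p (h.getD pp 0)) pp
          intro c hcl hc0 hcpar hpp0
          have hcl' : c < h.length := by simpa using hcl
          have e1 : (h.set p (h.getD pp 0)).getD ((pp-1)/2) 0 = h.getD ((pp-1)/2) 0 :=
            getD_set_ne _ (by omega) _
          have hroot : h.getD ((pp - 1) / 2) 0 ≤ h.getD pp 0 :=
            HH pp hpp0 hpph (by omega) (by omega)
          by_cases hcp : c = p
          · have e2 : (h.set p (h.getD pp 0)).getD c 0 = h.getD pp 0 := by
              rw [hcp]; exact getD_set_self _ hp _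
            rw [e1, e2]; exact hroot
          · have e2 : (h.set p (h.getD pp 0)).getD c 0 = h.getD c 0 :=
              getD_set_ne _ (fun hh => hcp hh.symm) _
            rw [e1, e2]
            have hc2 := HH c hc0 hcl' hcp (by omega)
            rw [hcpar] at hc2
            exact le_trans hroot hc2
        · -- ChildOK (h.set p (h.getD pp 0)) pp v
          intro c hcl hc0 hcpar
          have hcl' : c < h.length := by simpa using hcl
          by_cases hcp : c = p
          · have e2 : (h.set p (h.getD pp 0)).getD c 0 = h.getD pp 0 := by
              rw [hcp]; exact getD_set_self _ hp _
            rw [e2]; exact le_of_lt hlt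
          · have e2 : (h.set p (h.getD pp 0)).getD c 0 = h.getD c 0 :=
              getD_set_ne _ (fun hh => hcp hh.symm) _
            rw [e2]
            have hc2 := HH c hc0 hcl' hcp (by omega)
            rw [hcpar] at hc2
            exact le_trans (le_of_lt hlt) hc2
      · -- place newitem at p: newitem ≥ parent
        rw [sd_place h 0 p v hsp hlt]
        intro i hi0 hil
        have hil' : i < h.length := by simpa using hil
        by_cases hip : i = p
        · subst hip
          have e1 : (h.set i v).getD ((i-1)/2) 0 = h.getD ((i-1)/2) 0 :=
            getD_set_ne _ (by omega) _
          have e2 : (h.set i v).getD i 0 = v := getD_set_self _ hp _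
          rw [e1, e2]; exact not_lt.mp hlt
        · have e2 : (h.set p v).getD i 0 = h.getD i 0 :=
            getD_set_ne _ (fun hh => hip hh.symm) _
          by_cases hpar : (i - 1) / 2 = p
          · have e1 : (h.set p v).getD ((i-1)/2) 0 = v := by
              rw [hpar]; exact getD_set_self _ hp _
            rw [e1, e2]
            exact CO i hil' hi0 hpar
          · have e1 : (h.set p v).getD ((i-1)/2) 0 = h.getD ((i-1)/2) 0 :=
              getD_set_ne _ (fun hh => hpar hh.symm) _
            rw [e1, e2]
            exact HH i hi0 hil' hip hpar
    · -- p = 0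
      have hp0 : p = 0 := by omega
      subst hp0
      rw [sd_base h 0 0 v hsp]
      intro i hi0 hil
      have hil' : i < h.length := by simpa using hil
      have e2 : (h.set 0 v).getD i 0 = h.getD i 0 := getD_set_ne _ (by omega) _
      by_cases hpar : (i - 1) / 2 = 0
      · have e1 : (h.set 0 v).getD ((i-1)/2) 0 = v := by
          rw [hpar]; exact getD_set_self _ hp _
        rw [e1, e2]
        exact CO i hil' hi0 hpar
      · have e1 : (h.set 0 v).getD ((i-1)/2) 0 = h.getD ((i-1)/2) 0 :=
          getD_set_ne _ (fun hh => hpar hh.symm) _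
        rw [e1, e2]
        exact HH i hi0 hil' (by omega) hpar

-- ---- siftup: multiset content and heap-property restoration ----
lemma coe_set_set (h : List Int) {p c : Nat} (hp : p < h.length) (hc : c < h.length)
    (hne : p ≠ c) (v : Int) :
    (((h.set p (h.getD c 0)).set c v : List Int) : Multiset Int) = ((h.set p v : List Int) : Multiset Int) := by
  rw [coe_set_eq _ c (by simpa using hc) v, getD_set_ne _ hne,
    coe_set_eq _ p hp, Multiset.erase_cons_head, coe_set_eq _ p hp]

lemma siftupLoop_coe : ∀ (k : Nat) (h : List Int) (s p cp : Nat) (v : Int),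
    h.length - cp ≤ k → p < h.length → p < cp →
    ((lSiftupLoop h s p cp v : List Int) : Multiset Int) = ((h.set p v : List Int) : Multiset Int) := by
  intro k
  induction k with
  | zero =>
    intro h s p cp v hk hp hpc
    rw [su_base h s p cp v (by omega), siftdown_coe p _ s v (by simpa using hp)]
    rw [List.set_set]
  | succ k IH =>
    intro h s p cp v hk hp hpc
    by_cases hc : cp < h.length
    · rw [su_rec h s p cp v hc]
      split
      · rename_i hcond
        have hcl := hcond.1
        rw [IH _ s _ _ v (by simp only [List.length_set]; omega)
          (by simp only [List.length_set]; omega) (by omega)]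
        exact coe_set_set h hp (by omega) (by omega) v
      · rw [IH _ s _ _ v (by simp only [List.length_set]; omega)
          (by simp only [List.length_set]; omega) (by omega)]
        exact coe_set_set h hp (by omega) (by omega) v
    · rw [su_base h s p cp v hc, siftdown_coe p _ s v (by simpa using hp)]
      rw [List.set_set]

-- after moving the smaller child into the hole, the hole conditions move to that child
lemma su_step (h : List Int) {p c : Nat} (hp : p < h.length) (hc : c < h.length)
    (hc0 : 0 < c) (hchild : (c - 1) / 2 = p)
    (hmin : ∀ o : Nat, 0 < o → o < h.length → (o - 1) / 2 = p → h.getD c 0 ≤ h.getD o 0)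
    (HH : HoleHeap h p) (BR : Bridge h p) :
    HoleHeap (h.set p (h.getD c 0)) c ∧ Bridge (h.set p (h.getD c 0)) c := by
  have hcp : p < c := by omega
  constructor
  · intro i hi0 hil hic hpari
    have hil' : i < h.length := by simpa using hil
    by_cases hip : i = p
    · subst hip
      have e1 : (h.set i (h.getD c 0)).getD ((i-1)/2) 0 = h.getD ((i-1)/2) 0 :=
        getD_set_ne _ (by omega) _
      have e2 : (h.set i (h.getD c 0)).getD i 0 = h.getD c 0 := getD_set_self _ hp _
      rw [e1, e2]
      exact BR c hc (by omega) hchild hi0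
    · have e2 : (h.set p (h.getD c 0)).getD i 0 = h.getD i 0 :=
        getD_set_ne _ (fun hh => hip hh.symm) _
      by_cases hpar : (i - 1) / 2 = p
      · have e1 : (h.set p (h.getD c 0)).getD ((i-1)/2) 0 = h.getD c 0 := by
          rw [hpar]; exact getD_set_self _ hp _
        rw [e1, e2]
        exact hmin i hi0 hil' hpar
      · have e1 : (h.set p (h.getD c 0)).getD ((i-1)/2) 0 = h.getD ((i-1)/2) 0 :=
          getD_set_ne _ (fun hh => hpar hh.symm) _
        rw [e1, e2]
        exact HH i hi0 hil' hip hpar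
  · intro g hgl hg0 hgpar hc0
    have hgl' : g < h.length := by simpa using hgl
    have e1 : (h.set p (h.getD c 0)).getD ((c-1)/2) 0 = h.getD c 0 := by
      rw [hchild]; exact getD_set_self _ hp _
    have e2 : (h.set p (h.getD c 0)).getD g 0 = h.getD g 0 :=
      getD_set_ne _ (by omega) _
    rw [e1, e2]
    have hgg := HH g hg0 hgl' (by omega) (by omega)
    rw [hgpar] at hgg
    exact hgg

lemma siftupLoop_heap : ∀ (k : Nat) (h : List Int) (p : Nat) (v : Int),
    h.length - (2 * p + 1) ≤ k → p < h.length → HoleHeap h p → Bridge h p →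
    IsHeap (lSiftupLoop h 0 p (2 * p + 1) v) := by
  intro k
  induction k with
  | zero =>
    intro h p v hk hp HH BR
    rw [su_base h 0 p (2*p+1) v (by omega)]
    refine siftdown_heap p _ v (by simpa using hp) ?_ ?_ ?_
    · intro i hi0 hil hip hpari
      have hil' : i < h.length := by simpa using hil
      have e1 : (h.set p v).getD ((i-1)/2) 0 = h.getD ((i-1)/2) 0 :=
        getD_set_ne _ (fun hh => hpari hh.symm) _
      have e2 : (h.set p v).getD i 0 = h.getD i 0 :=
        getD_set_ne _ (fun hh => hip hh.symm) _
      rw [e1, e2]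
      exact HH i hi0 hil' hip hpari
    · intro c hcl hc0 hcpar hp0
      have : c < h.length := by simpa using hcl
      omega
    · intro c hcl hc0 hcpar
      have : c < h.length := by simpa using hcl
      omega
  | succ k IH =>
    intro h p v hk hp HH BR
    by_cases hc : 2 * p + 1 < h.length
    · rw [su_rec h 0 p (2*p+1) v hc]
      split
      · rename_i hcond
        have hcl : 2*p+1+1 < h.length := hcond.1
        have hstep := su_step h hp (show 2*p+1+1 < h.length from hcl) (by omega) (by omega)
          (fun o ho0 hol hopar => by
            have h2 := hcond.2
            have ho : o = 2*p+1 ∨ o = 2*p+1+1 := by omega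
            rcases ho with rfl | rfl
            · omega
            · exact le_refl _) HH BR
        exact IH _ (2*p+1+1) v (by simp only [List.length_set]; omega)
          (by simp only [List.length_set]; omega) hstep.1 hstep.2
      · rename_i hcond
        have hstep := su_step h hp (show 2*p+1 < h.length from hc) (by omega) (by omega)
          (fun o ho0 hol hopar => by
            have ho : o = 2*p+1 ∨ o = 2*p+1+1 := by omega
            rcases ho with rfl | rfl
            · exact le_refl _
            · rcases Decidable.not_and_iff_not_or_not.mp hcond with hlen | hlt
              · omega
              · have := not_not.mp hlt; omega) HH BR
        exact IH _ (2*p+1) v (by simp only [List.length_set]; omega)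
          (by simp only [List.length_set]; omega) hstep.1 hstep.2
    · rw [su_base h 0 p (2*p+1) v hc]
      refine siftdown_heap p _ v (by simpa using hp) ?_ ?_ ?_
      · intro i hi0 hil hip hpari
        have hil' : i < h.length := by simpa using hil
        have e1 : (h.set p v).getD ((i-1)/2) 0 = h.getD ((i-1)/2) 0 :=
          getD_set_ne _ (fun hh => hpari hh.symm) _
        have e2 : (h.set p v).getD i 0 = h.getD i 0 :=
          getD_set_ne _ (fun hh => hip hh.symm) _
        rw [e1, e2]
        exact HH i hi0 hil' hip hpari
      · intro c hcl hc0 hcpar hp0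
        have : c < h.length := by simpa using hcl
        omega
      · intro c hcl hc0 hcpar
        have : c < h.length := by simpa using hcl
        omega

-- ---- getD through append / dropLast ----
lemma getD_append_lt (l : List Int) (v : Int) {i : Nat} (hi : i < l.length) :
    (l ++ [v]).getD i 0 = l.getD i 0 := by
  rw [List.getD_eq_getElem _ 0 (by simp; omega), List.getD_eq_getElem _ 0 hi]
  exact List.getElem_append_left hi

lemma getD_concat_self (l : List Int) (v : Int) : (l ++ [v]).getD l.length 0 = v := by
  rw [List.getD_eq_getElem _ 0 (by simp)]
  exact List.getElem_concat_length rfl _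

lemma getD_dropLast (l : List Int) {i : Nat} (hi : i < l.dropLast.length) :
    l.dropLast.getD i 0 = l.getD i 0 := by
  rw [List.getD_eq_getElem _ 0 hi, List.getD_eq_getElem _ 0 (by simp at hi; omega)]
  exact List.getElem_dropLast hi

-- ---- heappush: adds its item to the heap's contents and keeps the heap property ----
lemma hpPush_spec (h : List Int) (v : Int) (H : IsHeap h) :
    IsHeap (lPush h v) ∧ ((lPush h v : List Int) : Multiset Int) = v ::ₘ (↑h : Multiset Int) := by
  constructor
  · refine siftdown_heap h.length (h ++ [v]) v (by simp) ?_ ?_ ?_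
    · intro i hi0 hil hip hpari
      have hil' : i < h.length := by simp at hil; omega
      rw [getD_append_lt h v hil', getD_append_lt h v (by omega)]
      exact H i hi0 hil'
    · intro c hcl hc0 hcpar hp0
      simp at hcl; omega
    · intro c hcl hc0 hcpar
      simp at hcl; omega
  · rw [lPush, siftdown_coe h.length _ 0 v (by simp),
      coe_set_eq _ h.length (by simp) v, getD_concat_self,
      ← Multiset.coe_add h [v]]
    show v ::ₘ ((↑h : Multiset Int) + {v}).erase v = v ::ₘ ↑h
    rw [add_comm, Multiset.singleton_add, Multiset.erase_cons_head]

-- ---- heappop: returns the root (= a minimum), removes one copy, keeps the heap property ----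
lemma isHeap_nil : IsHeap [] := by intro i hi0 hil; simp at hil

lemma hpPop_spec (h : List Int) (hne : h ≠ []) (H : IsHeap h) :
    (lPop h).1 = h.getD 0 0 ∧
    ((h : List Int) : Multiset Int) = (lPop h).1 ::ₘ (((lPop h).2 : List Int) : Multiset Int) ∧
    IsHeap (lPop h).2 := by
  have hlpos : 0 < h.length := List.length_pos_iff.mpr hne
  by_cases hdl : h.dropLast.isEmpty
  · -- h is a singleton
    have hlen1 : h.length = 1 := by
      have h0 : h.dropLast = [] := List.isEmpty_iff.mp hdl
      have := List.length_dropLast (xs := h)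
      rw [h0] at this; simp at this; omega
    obtain ⟨a, rfl⟩ := List.length_eq_one_iff.mp hlen1
    refine ⟨by simp [lPop], by simp [lPop], by simpa [lPop] using isHeap_nil⟩
  · -- general case
    have hrne : h.dropLast ≠ [] := fun hh => hdl (by simp [hh])
    have hrpos : 0 < h.dropLast.length := List.length_pos_iff.mpr hrne
    have hval : lPop h =
        (h.dropLast.getD 0 0, lSiftup (h.dropLast.set 0 (h.getLast?.getD 0)) 0) := by
      rw [lPop]
      rw [if_neg (by simpa [List.isEmpty_iff] using hrne)]
    have hlast : h.getLast?.getD 0 = h.getLast hne := by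
      rw [List.getLast?_eq_some_getLast hne]; rfl
    have hsplit : h.dropLast ++ [h.getLast hne] = h := List.dropLast_concat_getLast hne
    have hgpos : 0 < (h.dropLast.set 0 (h.getLast?.getD 0)).length := by
      simp only [List.length_set]; omega
    have hg0 : (h.dropLast.set 0 (h.getLast?.getD 0)).getD 0 0 = h.getLast?.getD 0 :=
      getD_set_self h.dropLast hrpos _
    have hsu_coe : ((lSiftup (h.dropLast.set 0 (h.getLast?.getD 0)) 0 : List Int) : Multiset Int)
        = (((h.dropLast.set 0 (h.getLast?.getD 0)) : List Int) : Multiset Int) := by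
      rw [lSiftup, siftupLoop_coe (h.dropLast.set 0 (h.getLast?.getD 0)).length _ 0 0 (2*0+1) _
        (by omega) hgpos (by omega), hg0, List.set_set]
    have hHH : HoleHeap (h.dropLast.set 0 (h.getLast?.getD 0)) 0 := by
      intro i hi0 hil hip hpari
      have hil' : i < h.dropLast.length := by simp only [List.length_set] at hil; omega
      have e1 : (h.dropLast.set 0 (h.getLast?.getD 0)).getD ((i-1)/2) 0
          = h.dropLast.getD ((i-1)/2) 0 := getD_set_ne h.dropLast (fun hh => hpari hh.symm) _
      have e2 : (h.dropLast.set 0 (h.getLast?.getD 0)).getD i 0 = h.dropLast.getD i 0 :=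
        getD_set_ne h.dropLast (fun hh => hip hh.symm) _
      rw [e1, e2, getD_dropLast h (by omega : (i-1)/2 < h.dropLast.length),
        getD_dropLast h (by omega : i < h.dropLast.length)]
      have : h.dropLast.length = h.length - 1 := List.length_dropLast
      exact H i hi0 (by omega)
    have hBR : Bridge (h.dropLast.set 0 (h.getLast?.getD 0)) 0 :=
      fun c _ _ _ hp0 => absurd hp0 (lt_irrefl 0)
    have hsu_heap : IsHeap (lSiftup (h.dropLast.set 0 (h.getLast?.getD 0)) 0) := by
      rw [lSiftup]
      exact siftupLoop_heap (h.dropLast.set 0 (h.getLast?.getD 0)).length _ 0 _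
        (by omega) hgpos hHH hBR
    have hr0 : h.dropLast.getD 0 0 = h.getD 0 0 := getD_dropLast h hrpos
    refine ⟨by rw [hval]; exact hr0, ?_, by rw [hval]; exact hsu_heap⟩
    rw [hval]
    show ((h : List Int) : Multiset Int) = h.dropLast.getD 0 0 ::ₘ _
    rw [hsu_coe, coe_set_eq h.dropLast 0 hrpos _, Multiset.cons_swap,
      Multiset.cons_erase (show h.dropLast.getD 0 0 ∈ (↑h.dropLast : Multiset Int) from
        by exact_mod_cast getD_mem0 h.dropLast hrpos)]
    conv_lhs => rw [← hsplit]
    rw [← Multiset.coe_add, Multiset.coe_singleton, add_comm, Multiset.singleton_add, hlast]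

-- ---- heapify on the all-zero initial list is the identity ----
lemma sd_replicate : ∀ (p k s : Nat), lSiftdown (List.replicate k (0:Int)) s p 0 = List.replicate k 0 := by
  intro p
  induction p using Nat.strong_induction_on with
  | _ p IH =>
    intro k s
    by_cases hsp : s < p
    · rw [sd_place _ _ _ _ hsp (by rw [getD_replicate0]; exact lt_irrefl 0)]
      exact List.set_replicate_self ..
    · rw [sd_base _ _ _ _ hsp]
      exact List.set_replicate_self ..

lemma su_replicate : ∀ (fuel k s p cp : Nat), k - cp ≤ fuel →
    lSiftupLoop (List.replicate k (0:Int)) s p cp 0 = List.replicate k 0 := by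
  intro fuel
  induction fuel with
  | zero =>
    intro k s p cp hk
    rw [su_base _ _ _ _ _ (by simp; omega), List.set_replicate_self ..]
    exact sd_replicate p k s
  | succ fuel IH =>
    intro k s p cp hk
    by_cases hc : cp < k
    · rw [su_rec _ _ _ _ _ (by simpa using hc)]
      split
      · rw [getD_replicate0, List.set_replicate_self ..]
        exact IH k s _ _ (by omega)
      · rw [getD_replicate0, List.set_replicate_self ..]
        exact IH k s _ _ (by omega)
    · rw [su_base _ _ _ _ _ (by simpa using hc), List.set_replicate_self ..]
      exact sd_replicate p k s

lemma heapify_replicate (k : Nat) : lHeapify (List.replicate k (0:Int)) = List.replicate k 0 := by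
  rw [lHeapify]
  generalize (List.range ((List.replicate k (0:Int)).length / 2)).reverse = L
  induction L with
  | nil => rfl
  | cons i L IHL =>
    rw [List.foldl_cons, lSiftup, getD_replicate0, su_replicate k k i i (2*i+1) (by omega)]
    exact IHL

lemma isHeap_replicate (k : Nat) : IsHeap (List.replicate k (0:Int)) := by
  intro i hi0 hil
  rw [getD_replicate0, getD_replicate0]

-- ---- B's linear min-scan: unfolding equations and specification ----
lemma bx_lt (loads : List Int) (j bi : Nat) (bv : Int) (hj : j < loads.length)
    (hlt : loads.getD j 0 < bv) :
    lMinIdxAux loads j bi bv = lMinIdxAux loads (j+1) j (loads.getD j 0) := by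
  rw [lMinIdxAux]; rw [dif_pos hj, if_pos hlt]

lemma bx_ge (loads : List Int) (j bi : Nat) (bv : Int) (hj : j < loads.length)
    (hge : ¬ loads.getD j 0 < bv) :
    lMinIdxAux loads j bi bv = lMinIdxAux loads (j+1) bi bv := by
  rw [lMinIdxAux]; rw [dif_pos hj, if_neg hge]

lemma bx_base (loads : List Int) (j bi : Nat) (bv : Int) (hj : ¬ j < loads.length) :
    lMinIdxAux loads j bi bv = bi := by
  rw [lMinIdxAux]; rw [dif_neg hj]

lemma bAux_spec : ∀ (fuel : Nat) (loads : List Int) (j bi : Nat) (bv : Int),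
    loads.length - j ≤ fuel → bi < loads.length → loads.getD bi 0 = bv →
    (∀ t, t < j → bv ≤ loads.getD t 0) →
    lMinIdxAux loads j bi bv < loads.length ∧
      ∀ t, t < loads.length → loads.getD (lMinIdxAux loads j bi bv) 0 ≤ loads.getD t 0 := by
  intro fuel
  induction fuel with
  | zero =>
    intro loads j bi bv hk hbi hbv hinv
    rw [bx_base _ _ _ _ (by omega)]
    exact ⟨hbi, fun t ht => by rw [hbv]; exact hinv t (by omega)⟩
  | succ fuel IH =>
    intro loads j bi bv hk hbi hbv hinv
    by_cases hj : j < loads.length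
    · by_cases hlt : loads.getD j 0 < bv
      · rw [bx_lt _ _ _ _ hj hlt]
        refine IH loads (j+1) j _ (by omega) hj rfl ?_
        intro t ht
        rcases Nat.lt_or_ge t j with h1 | h1
        · exact le_trans (le_of_lt hlt) (hinv t h1)
        · have : t = j := by omega
          subst this; exact le_refl _
      · rw [bx_ge _ _ _ _ hj hlt]
        refine IH loads (j+1) bi bv (by omega) hbi hbv ?_
        intro t ht
        rcases Nat.lt_or_ge t j with h1 | h1
        · exact hinv t h1
        · have : t = j := by omega
          subst this; omega
    · rw [bx_base _ _ _ _ hj]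
      exact ⟨hbi, fun t ht => by rw [hbv]; exact hinv t (by omega)⟩

lemma bMinIdx_spec (loads : List Int) (hne : loads ≠ []) :
    lMinIdx loads < loads.length ∧
      ∀ t, t < loads.length → loads.getD (lMinIdx loads) 0 ≤ loads.getD t 0 := by
  have hpos : 0 < loads.length := List.length_pos_iff.mpr hne
  refine bAux_spec loads.length loads 1 0 _ (by omega) hpos rfl ?_
  intro t ht
  have : t = 0 := by omega
  subst this; exact le_refl _

-- ---- one scheduling step preserves the heap/plain-list correspondence ----
lemma step_inv (st1 st2 : List Int × Int) (x : Int) (H : IsHeap st1.1)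
    (M : ((st1.1 : List Int) : Multiset Int) = ((st2.1 : List Int) : Multiset Int))
    (NE : st1.1 ≠ []) (L : st1.2 = st2.2) :
    IsHeap (lStepA st1 x).1 ∧
      (((lStepA st1 x).1 : List Int) : Multiset Int) = (((lStepB st2 x).1 : List Int) : Multiset Int) ∧
      (lStepA st1 x).1 ≠ [] ∧ (lStepA st1 x).2 = (lStepB st2 x).2 := by
  obtain ⟨hr, hcoe, hheap⟩ := hpPop_spec st1.1 NE H
  have hne2 : st2.1 ≠ [] := by
    intro hn
    rw [hn] at M
    exact NE (by simpa using M)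
  obtain ⟨hbi, hbmin⟩ := bMinIdx_spec st2.1 hne2
  have hpos1 : 0 < st1.1.length := List.length_pos_iff.mpr NE
  -- the popped root equals the scanned minimum
  have hrw : st1.1.getD 0 0 = st2.1.getD (lMinIdx st2.1) 0 := by
    refine le_antisymm ?_ ?_
    · have hmem : st2.1.getD (lMinIdx st2.1) 0 ∈ st1.1 := by
        have : st2.1.getD (lMinIdx st2.1) 0 ∈ st2.1 := getD_mem0 st2.1 hbi
        have h2 : st2.1.getD (lMinIdx st2.1) 0 ∈ ((st2.1 : List Int) : Multiset Int) := by
          exact_mod_cast this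
        rw [← M] at h2
        exact_mod_cast h2
      obtain ⟨i2, hi2, he2⟩ := mem_exists_getD st1.1 hmem
      rw [← he2]
      exact root_le H i2 hi2
    · have hmem : st1.1.getD 0 0 ∈ st2.1 := by
        have : st1.1.getD 0 0 ∈ st1.1 := getD_mem0 st1.1 hpos1
        have h2 : st1.1.getD 0 0 ∈ ((st1.1 : List Int) : Multiset Int) := by exact_mod_cast this
        rw [M] at h2
        exact_mod_cast h2
      obtain ⟨i2, hi2, he2⟩ := mem_exists_getD st2.1 hmem
      rw [← he2]
      exact hbmin i2 hi2
  obtain ⟨hpheap, hpcoe⟩ := hpPush_spec (lPop st1.1).2 ((lPop st1.1).1 + x) hheap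
  have herase : (((lPop st1.1).2 : List Int) : Multiset Int)
      = ((st1.1 : List Int) : Multiset Int).erase (st1.1.getD 0 0) := by
    rw [hcoe, hr, Multiset.erase_cons_head]
  refine ⟨hpheap, ?_, ?_, ?_⟩
  · show (((lPush (lPop st1.1).2 ((lPop st1.1).1 + x) : List Int)) : Multiset Int) = _
    rw [hpcoe, hr, herase]
    show _ = ((st2.1.set (lMinIdx st2.1) (st2.1.getD (lMinIdx st2.1) 0 + x) : List Int) : Multiset Int)
    rw [coe_set_eq st2.1 (lMinIdx st2.1) hbi _, hrw, M]
  · show lPush (lPop st1.1).2 ((lPop st1.1).1 + x) ≠ []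
    intro hn
    rw [hn] at hpcoe
    have := congrArg Multiset.card hpcoe
    simp at this
  · show max st1.2 ((lPop st1.1).1 + x) = _
    show _ = if st2.2 < st2.1.getD (lMinIdx st2.1) 0 + x then st2.1.getD (lMinIdx st2.1) 0 + x else st2.2
    rw [hr, hrw, L, max_def]
    split_ifs <;> omega

lemma fold_inv : ∀ (a : List Int) (st1 st2 : List Int × Int), IsHeap st1.1 →
    ((st1.1 : List Int) : Multiset Int) = ((st2.1 : List Int) : Multiset Int) →
    st1.1 ≠ [] → st1.2 = st2.2 →
    (a.foldl lStepA st1).2 = (a.foldl lStepB st2).2 := by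
  intro a
  induction a with
  | nil => intro st1 st2 _ _ _ L; exact L
  | cons x xs IH =>
    intro st1 st2 H M NE L
    obtain ⟨h1, h2, h3, h4⟩ := step_inv st1 st2 x H M NE L
    exact IH (lStepA st1 x) (lStepB st2 x) h1 h2 h3 h4

-- ---- bridges between the Array ports and their List models ----
lemma agetD (a : Array Int) (i : Nat) : aread a i = a.toList.getD i 0 := by
  simp only [aread, Array.getD, List.getD_eq_getElem?_getD]
  split
  · rename_i hh
    rw [List.getElem?_eq_getElem (by simpa [← Array.size_eq_length_toList] using hh)]
    simp
  · rename_i hh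
    rw [List.getElem?_eq_none (by rw [← Array.size_eq_length_toList]; omega)]
    rfl

lemma asize (a : Array Int) : a.size = a.toList.length := Array.size_eq_length_toList

lemma asd_up (h : Array Int) (s p : Nat) (v : Int) (hsp : s < p)
    (hlt : v < aread h ((p-1)/2)) :
    hpSiftdown h s p v = hpSiftdown (h.setIfInBounds p (aread h ((p-1)/2))) s ((p-1)/2) v := by
  rw [hpSiftdown]; dsimp only; rw [dif_pos hsp, if_pos hlt]

lemma asd_place (h : Array Int) (s p : Nat) (v : Int) (hsp : s < p)
    (hlt : ¬ v < aread h ((p-1)/2)) :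
    hpSiftdown h s p v = h.setIfInBounds p v := by
  rw [hpSiftdown]; dsimp only; rw [dif_pos hsp, if_neg hlt]

lemma asd_base (h : Array Int) (s p : Nat) (v : Int) (hsp : ¬ s < p) :
    hpSiftdown h s p v = h.setIfInBounds p v := by
  rw [hpSiftdown]; dsimp only; rw [dif_neg hsp]

lemma asu_rec (h : Array Int) (s p cp : Nat) (v : Int) (hc : cp < h.size) :
    hpSiftupLoop h s p cp v =
      (if cp + 1 < h.size ∧ ¬ (aread h cp < aread h (cp + 1))
        then hpSiftupLoop (h.setIfInBounds p (aread h (cp+1))) s (cp+1) (2 * (cp+1) + 1) v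
        else hpSiftupLoop (h.setIfInBounds p (aread h cp)) s cp (2 * cp + 1) v) := by
  rw [hpSiftupLoop]; dsimp only; rw [dif_pos hc]; split <;> rfl

lemma asu_base (h : Array Int) (s p cp : Nat) (v : Int) (hc : ¬ cp < h.size) :
    hpSiftupLoop h s p cp v = hpSiftdown (h.setIfInBounds p v) s p v := by
  rw [hpSiftupLoop]; dsimp only; rw [dif_neg hc]

lemma sim_sd : ∀ (p : Nat) (h : Array Int) (s : Nat) (v : Int),
    (hpSiftdown h s p v).toList = lSiftdown h.toList s p v := by
  intro p
  induction p using Nat.strong_induction_on with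
  | _ p IH =>
    intro h s v
    by_cases hsp : s < p
    · by_cases hlt : v < h.toList.getD ((p-1)/2) 0
      · rw [asd_up h s p v hsp (by rw [agetD]; exact hlt),
          sd_up h.toList s p v hsp hlt,
          IH ((p-1)/2) (by omega), Array.toList_setIfInBounds, agetD]
      · rw [asd_place h s p v hsp (by rw [agetD]; exact hlt),
          sd_place h.toList s p v hsp hlt, Array.toList_setIfInBounds]
    · rw [asd_base h s p v hsp, sd_base h.toList s p v hsp, Array.toList_setIfInBounds]

lemma sim_su : ∀ (fuel : Nat) (h : Array Int) (s p cp : Nat) (v : Int), h.size - cp ≤ fuel →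
    (hpSiftupLoop h s p cp v).toList = lSiftupLoop h.toList s p cp v := by
  intro fuel
  induction fuel with
  | zero =>
    intro h s p cp v hk
    rw [asu_base h s p cp v (by omega), su_base h.toList s p cp v (by rw [← asize]; omega),
      sim_sd, Array.toList_setIfInBounds]
  | succ fuel IH =>
    intro h s p cp v hk
    by_cases hc : cp < h.size
    · rw [asu_rec h s p cp v hc, su_rec h.toList s p cp v (by rw [← asize]; exact hc)]
      have hiff : (cp + 1 < h.size ∧ ¬ (aread h cp < aread h (cp+1))) ↔
          (cp + 1 < h.toList.length ∧ ¬ (h.toList.getD cp 0 < h.toList.getD (cp+1) 0)) := by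
        rw [asize, agetD, agetD]
      by_cases hcd : cp + 1 < h.toList.length ∧ ¬ (h.toList.getD cp 0 < h.toList.getD (cp+1) 0)
      · rw [if_pos (hiff.mpr hcd), if_pos hcd,
          IH _ s _ _ v (by simp only [Array.size_setIfInBounds]; omega),
          Array.toList_setIfInBounds, agetD]
      · rw [if_neg (fun hh => hcd (hiff.mp hh)), if_neg hcd,
          IH _ s _ _ v (by simp only [Array.size_setIfInBounds]; omega),
          Array.toList_setIfInBounds, agetD]
    · rw [asu_base h s p cp v hc, su_base h.toList s p cp v (by rw [← asize]; omega),
        sim_sd, Array.toList_setIfInBounds]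

lemma sim_siftup (a : Array Int) (p : Nat) : (hpSiftup a p).toList = lSiftup a.toList p := by
  rw [hpSiftup, lSiftup, sim_su a.size a p p (2*p+1) _ (by omega), agetD]

lemma aPop_pos (h : Array Int) (hemp : h.pop.isEmpty) : hpPop h = (h.back?.getD 0, h.pop) := by
  rw [hpPop]; rw [if_pos hemp]

lemma aPop_neg (h : Array Int) (hemp : ¬ h.pop.isEmpty) :
    hpPop h = (aread h.pop 0, hpSiftup (h.pop.setIfInBounds 0 (h.back?.getD 0)) 0) := by
  rw [hpPop]; rw [if_neg hemp]

lemma lPop_pos (h : List Int) (hemp : h.dropLast.isEmpty) :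
    lPop h = (h.getLast?.getD 0, h.dropLast) := by
  rw [lPop]; rw [if_pos hemp]

lemma lPop_neg (h : List Int) (hemp : ¬ h.dropLast.isEmpty) :
    lPop h = (h.dropLast.getD 0 0, lSiftup (h.dropLast.set 0 (h.getLast?.getD 0)) 0) := by
  rw [lPop]; rw [if_neg hemp]

lemma sim_pop (h : Array Int) :
    (hpPop h).1 = (lPop h.toList).1 ∧ (hpPop h).2.toList = (lPop h.toList).2 := by
  have hb : h.back?.getD 0 = h.toList.getLast?.getD 0 := by rw [Array.getLast?_toList]
  have hpl : h.pop.toList = h.toList.dropLast := Array.toList_pop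
  have hemp : h.pop.isEmpty = h.toList.dropLast.isEmpty := by
    rw [← Array.isEmpty_toList, hpl]
  by_cases he : h.pop.isEmpty
  · rw [aPop_pos h he, lPop_pos h.toList (by rw [← hemp]; exact he)]
    exact ⟨hb, by rw [hpl]⟩
  · rw [aPop_neg h he, lPop_neg h.toList (by rw [← hemp]; exact he)]
    constructor
    · show aread h.pop 0 = h.toList.dropLast.getD 0 0
      rw [agetD, hpl]
    · show (hpSiftup (h.pop.setIfInBounds 0 (h.back?.getD 0)) 0).toList = _
      rw [sim_siftup, Array.toList_setIfInBounds, hpl, hb]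

lemma sim_push (h : Array Int) (v : Int) : (hpPush h v).toList = lPush h.toList v := by
  rw [hpPush, lPush, sim_sd, Array.toList_push, asize]

lemma sim_stepA (st : Array Int × Int) (x : Int) :
    (stepA st x).1.toList = (lStepA (st.1.toList, st.2) x).1 ∧
      (stepA st x).2 = (lStepA (st.1.toList, st.2) x).2 := by
  obtain ⟨h1, h2⟩ := sim_pop st.1
  constructor
  · show (hpPush (hpPop st.1).2 ((hpPop st.1).1 + x)).toList = _
    rw [sim_push, h1, h2]
    rfl
  · show max st.2 ((hpPop st.1).1 + x) = _
    rw [h1]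
    rfl

lemma sim_minIdxAux : ∀ (fuel : Nat) (loads : Array Int) (j bi : Nat) (bv : Int),
    loads.size - j ≤ fuel → bMinIdxAux loads j bi bv = lMinIdxAux loads.toList j bi bv := by
  intro fuel
  induction fuel with
  | zero =>
    intro loads j bi bv hk
    rw [bMinIdxAux, lMinIdxAux, dif_neg (by omega), dif_neg (by rw [← asize]; omega)]
  | succ fuel IH =>
    intro loads j bi bv hk
    by_cases hj : j < loads.size
    · rw [bMinIdxAux, lMinIdxAux, dif_pos hj, dif_pos (by rw [← asize]; exact hj)]
      by_cases hlt : loads.toList.getD j 0 < bv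
      · rw [if_pos (by rw [agetD]; exact hlt), if_pos hlt, agetD]
        exact IH loads (j+1) j _ (by omega)
      · rw [if_neg (by rw [agetD]; exact hlt), if_neg hlt]
        exact IH loads (j+1) bi bv (by omega)
    · rw [bMinIdxAux, lMinIdxAux, dif_neg hj, dif_neg (by rw [← asize]; exact hj)]

lemma sim_minIdx (loads : Array Int) : bMinIdx loads = lMinIdx loads.toList := by
  rw [bMinIdx, lMinIdx, sim_minIdxAux loads.size loads 1 0 _ (by omega), agetD]

lemma sim_stepB (st : Array Int × Int) (x : Int) :
    (stepB st x).1.toList = (lStepB (st.1.toList, st.2) x).1 ∧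
      (stepB st x).2 = (lStepB (st.1.toList, st.2) x).2 := by
  constructor
  · show (st.1.setIfInBounds (bMinIdx st.1) (aread st.1 (bMinIdx st.1) + x)).toList = _
    rw [Array.toList_setIfInBounds, sim_minIdx, agetD]
    rfl
  · show (if st.2 < aread st.1 (bMinIdx st.1) + x then aread st.1 (bMinIdx st.1) + x else st.2) = _
    rw [sim_minIdx, agetD]
    rfl

lemma sim_foldA : ∀ (a : List Int) (st : Array Int × Int),
    (a.foldl stepA st).2 = (a.foldl lStepA (st.1.toList, st.2)).2 := by
  intro a
  induction a with
  | nil => intro st; rfl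
  | cons x xs IH =>
    intro st
    have hpair : ((stepA st x).1.toList, (stepA st x).2) = lStepA (st.1.toList, st.2) x :=
      Prod.ext (sim_stepA st x).1 (sim_stepA st x).2
    rw [List.foldl_cons, List.foldl_cons, IH (stepA st x), hpair]

lemma sim_foldB : ∀ (a : List Int) (st : Array Int × Int),
    (a.foldl stepB st).2 = (a.foldl lStepB (st.1.toList, st.2)).2 := by
  intro a
  induction a with
  | nil => intro st; rfl
  | cons x xs IH =>
    intro st
    have hpair : ((stepB st x).1.toList, (stepB st x).2) = lStepB (st.1.toList, st.2) x :=
      Prod.ext (sim_stepB st x).1 (sim_stepB st x).2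
    rw [List.foldl_cons, List.foldl_cons, IH (stepB st x), hpair]

lemma sim_heapify (h : Array Int) : (hpHeapify h).toList = lHeapify h.toList := by
  rw [hpHeapify, lHeapify, asize]
  generalize (List.range (h.toList.length / 2)).reverse = L
  induction L generalizing h with
  | nil => rfl
  | cons i L IHL =>
    rw [List.foldl_cons, List.foldl_cons, ← sim_siftup]
    exact IHL (hpSiftup h i)

theorem min_max_load_spec : Claim_equal_min_max_load := by
  intro n m xs _hdom hpre
  unfold Spec_min_max_load min_max_load min_max_load_alt
  by_cases hg : m = 0 ∨ n = 0
  · rw [if_pos hg, if_pos hg]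
  · rw [if_neg hg, if_neg hg]
    rcases hpre with hn | hxs
    · have hn0 : n ≠ 0 := fun hh => hg (Or.inr hh)
      have hpos : 0 < n.toNat := by omega
      rw [sim_foldA, sim_foldB, sim_heapify, Array.toList_replicate, heapify_replicate]
      refine fold_inv _ _ _ (isHeap_replicate n.toNat) rfl ?_ rfl
      exact List.ne_nil_of_length_pos (by simpa using hpos)
    · subst hxs
      have hsnil : PySem.List.sorted ([] : List Int) (fun x => x) true = [] := rfl
      rw [hsnil]
      rfl
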